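-- pv_equiv track=rewrite | github.com/sekhar-madha/become_coder_python | count_increasee_sets.py | maxsort
-- ===== SOURCE A (Python) =====
-- def maxsort(data):
--     c=1
--     maxc=0
--     sets=0
--     for i in range(len(data)-1):
--         if data[i]<=data[i+1]:
--             c+=1
--             continue
--         else:
--             if maxc<=c:
--                 maxc=c
--                 sets+=1
--             c=1
--             sets+=1
--             continue
--     if data==[]:
--         return 0
--     if c>maxc:
--         return sets
--     else:
--         return sets
-- ===== SOURCE B (Python) =====
-- def maxsort(data):
--     # Pass 1: lengths of maximal non-decreasing runs.
--     runs = []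
--     cur = 1
--     for i in range(1, len(data)):
--         if data[i - 1] <= data[i]:
--             cur += 1
--         else:
--             runs.append(cur)
--             cur = 1
--     if data:
--         runs.append(cur)
--     # Pass 2: fold over every run except the last.
--     maxc = 0
--     sets = 0
--     for r in runs[:-1]:
--         if maxc <= r:
--             maxc = r
--             sets += 1
--         sets += 1
--     return sets
-- ===== Notes on version B (the rewrite author's own statement) =====
-- stated objective: alternative
-- what changed: A's single interleaved scan with three live variables is replaced by a two-pass build-then-fold: first compute the list of maximal non-decreasing run lengths, then fold the running-max/count rule over all runs except the last.
import Mathlib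
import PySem

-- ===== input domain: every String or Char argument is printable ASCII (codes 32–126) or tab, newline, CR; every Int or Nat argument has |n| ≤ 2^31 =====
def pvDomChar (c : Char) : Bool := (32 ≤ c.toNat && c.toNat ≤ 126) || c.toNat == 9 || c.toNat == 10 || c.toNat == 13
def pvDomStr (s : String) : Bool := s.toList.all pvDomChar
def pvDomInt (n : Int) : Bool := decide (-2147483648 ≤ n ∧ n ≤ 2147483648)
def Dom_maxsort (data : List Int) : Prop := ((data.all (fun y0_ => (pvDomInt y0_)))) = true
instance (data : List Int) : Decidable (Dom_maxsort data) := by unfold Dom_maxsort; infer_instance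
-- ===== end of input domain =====

-- B replaces A's interleaved scan by a build-then-fold two-pass decomposition (run lengths first, then a fold over all but the last run); objective: alternative.

-- ===== PORT A =====
-- single interleaved scan over i in range(len(data)-1), state (c, maxc, sets)
def maxsort (data : List Int) : Int :=
  let st := (PySem.List.pyRange 0 ((data.length : Int) - 1) 1).foldl
    (fun (s : Int × Int × Int) i =>
      if PySem.List.pyGetD data i 0 ≤ PySem.List.pyGetD data (i + 1) 0 then
        (s.1 + 1, s.2.1, s.2.2)
      else
        if s.2.1 ≤ s.1 then (1, s.1, s.2.2 + 1 + 1) else (1, s.2.1, s.2.2 + 1))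
    (1, 0, 0)
  if data = [] then 0
  else if st.1 > st.2.1 then st.2.2 else st.2.2

-- ===== PORT B =====
-- pass 1 of Source B: the run-length list (structural recursion over the tail, carrying the previous element and current run length)
def pvRuns (prev cur : Int) : List Int → List Int
  | [] => [cur]
  | x :: xs => if prev ≤ x then pvRuns x (cur + 1) xs else cur :: pvRuns x 1 xs

-- pass 2 of Source B: one fold step over a run length, state (maxc, sets)
def pvCount (s : Int × Int) (r : Int) : Int × Int :=
  if s.1 ≤ r then (r, s.2 + 1 + 1) else (s.1, s.2 + 1)

def maxsort_alt (data : List Int) : Int :=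
  let runs := match data with
    | [] => []
    | x :: xs => pvRuns x 1 xs
  (runs.dropLast.foldl pvCount (0, 0)).2

-- ===== PRECONDITION & SPEC =====
def Spec_maxsort (data : List Int) (out : Int) : Prop := out = maxsort_alt data
instance (data : List Int) (out : Int) : Decidable (Spec_maxsort data out) := by unfold Spec_maxsort; infer_instance

-- ===== CLAIM (what is proved, stated in full; the proofs are below) =====
def Claim_equal_maxsort : Prop := ∀ (data : List Int), Dom_maxsort data → Spec_maxsort data (maxsort data)

-- ===== LEMMAS AND PROOFS =====

-- foldl only depends on the step function's values on list members
theorem pvFoldl_congr {α β : Type} {l : List β} {f g : α → β → α} {init : α}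
    (h : ∀ a b, b ∈ l → f a b = g a b) : l.foldl f init = l.foldl g init := by
  induction l generalizing init with
  | nil => rfl
  | cons x xs ih =>
    rw [List.foldl_cons, List.foldl_cons, h init x (by simp)]
    exact ih (fun a b hb => h a b (by simp [hb]))

-- A's loop rewritten as structural recursion over consecutive pairs
def pvAuxA (prev : Int) (t : List Int) (s : Int × Int × Int) : Int × Int × Int :=
  match t with
  | [] => s
  | y :: ys =>
      pvAuxA y ys
        (if prev ≤ y then (s.1 + 1, s.2.1, s.2.2)
         else if s.2.1 ≤ s.1 then (1, s.1, s.2.2 + 1 + 1) else (1, s.2.1, s.2.2 + 1))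

theorem pvFoldA_eq_aux (x : Int) (t : List Int) (s : Int × Int × Int) :
    (List.range t.length).foldl
      (fun (s : Int × Int × Int) (k : Nat) =>
        if PySem.List.pyGetD (x :: t) (k : Int) 0 ≤ PySem.List.pyGetD (x :: t) ((k : Int) + 1) 0 then
          (s.1 + 1, s.2.1, s.2.2)
        else if s.2.1 ≤ s.1 then (1, s.1, s.2.2 + 1 + 1) else (1, s.2.1, s.2.2 + 1)) s
    = pvAuxA x t s := by
  induction t generalizing x s with
  | nil => simp [pvAuxA]
  | cons y ys ih =>
    show (List.range (ys.length + 1)).foldl _ s = _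
    rw [List.range_succ_eq_map, List.foldl_cons, List.foldl_map]
    have h0 : ∀ (s' : Int × Int × Int),
        (List.range ys.length).foldl
          (fun (s : Int × Int × Int) (k : Nat) =>
            if PySem.List.pyGetD (x :: y :: ys) ((k.succ : Nat) : Int) 0
                ≤ PySem.List.pyGetD (x :: y :: ys) (((k.succ : Nat) : Int) + 1) 0 then
              (s.1 + 1, s.2.1, s.2.2)
            else if s.2.1 ≤ s.1 then (1, s.1, s.2.2 + 1 + 1) else (1, s.2.1, s.2.2 + 1)) s'
        = pvAuxA y ys s' := by
      intro s'
      rw [← ih y s']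
      apply pvFoldl_congr
      intro a b _
      have e1 : PySem.List.pyGetD (x :: y :: ys) ((b.succ : Nat) : Int) 0
          = PySem.List.pyGetD (y :: ys) (b : Int) 0 := by
        rw [PySem.List.pyGetD_natCast, PySem.List.pyGetD_natCast]
        rfl
      have e2 : PySem.List.pyGetD (x :: y :: ys) (((b.succ : Nat) : Int) + 1) 0
          = PySem.List.pyGetD (y :: ys) ((b : Int) + 1) 0 := by
        rw [show ((b.succ : Nat) : Int) + 1 = (((b + 2 : Nat)) : Int) by omega,
            show ((b : Int) + 1) = (((b + 1 : Nat)) : Int) by omega,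
            PySem.List.pyGetD_natCast, PySem.List.pyGetD_natCast]
        rfl
      rw [e1, e2]
    rw [h0]
    have ex : PySem.List.pyGetD (x :: y :: ys) ((0 : Nat) : Int) 0 = x := by
      rw [PySem.List.pyGetD_natCast]; rfl
    have ey : PySem.List.pyGetD (x :: y :: ys) (((0 : Nat) : Int) + 1) 0 = y := by
      rw [show (((0 : Nat) : Int) + 1) = (((1 : Nat)) : Int) by omega,
          PySem.List.pyGetD_natCast]
      rfl
    rw [ex, ey]
    rfl

-- the sets component of B's second fold is additive in its start value
theorem pvCount_add (l : List Int) (m s : Int) :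
    (l.foldl pvCount (m, s)).2 = s + (l.foldl pvCount (m, 0)).2 := by
  induction l generalizing m s with
  | nil => simp
  | cons r rs ih =>
    simp only [List.foldl_cons, pvCount]
    by_cases h : m ≤ r
    · simp only [if_pos h]
      rw [ih r (s + 1 + 1), ih r (0 + 1 + 1)]; ring
    · simp only [if_neg h]
      rw [ih m (s + 1), ih m (0 + 1)]; ring

theorem pvRuns_ne_nil (prev cur : Int) (t : List Int) : pvRuns prev cur t ≠ [] := by
  induction t generalizing prev cur with
  | nil => simp [pvRuns]
  | cons x xs ih =>
    simp only [pvRuns]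
    split
    · exact ih x (cur + 1)
    · simp

-- the bridge: A's interleaved state equals B's fold over all runs but the last
theorem pvAux_eq_count (t : List Int) (prev c maxc sets : Int) :
    (pvAuxA prev t (c, maxc, sets)).2.2
      = sets + ((pvRuns prev c t).dropLast.foldl pvCount (maxc, 0)).2 := by
  induction t generalizing prev c maxc sets with
  | nil => simp [pvAuxA, pvRuns]
  | cons y ys ih =>
    simp only [pvAuxA, pvRuns]
    by_cases h : prev ≤ y
    · simp only [if_pos h]
      exact ih y (c + 1) maxc sets
    · simp only [if_neg h]
      have hd : (c :: pvRuns y 1 ys).dropLast = c :: (pvRuns y 1 ys).dropLast := by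
        cases hy : pvRuns y 1 ys with
        | nil => exact absurd hy (pvRuns_ne_nil y 1 ys)
        | cons a l => simp
      rw [hd, List.foldl_cons]
      by_cases hm : maxc ≤ c
      · simp only [if_pos hm, pvCount]
        rw [ih y 1 c (sets + 1 + 1), pvCount_add _ c (0 + 1 + 1)]
        ring
      · simp only [if_neg hm, pvCount]
        rw [ih y 1 maxc (sets + 1), pvCount_add _ maxc (0 + 1)]
        ring

-- ===== VERDICT (by name: the statement is the Claim_ definition above) =====
theorem maxsort_spec : Claim_equal_maxsort := by
  intro data _
  show maxsort data = maxsort_alt data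
  cases data with
  | nil => rfl
  | cons x t =>
    unfold maxsort maxsort_alt
    have hlen : ((x :: t).length : Int) - 1 = (t.length : Int) := by
      simp
    rw [hlen, PySem.List.pyRange_zero_nat, List.foldl_map]
    rw [pvFoldA_eq_aux x t (1, 0, 0)]
    have := pvAux_eq_count t x 1 0 0
    simp only [reduceCtorEq, ite_false]
    rw [this]
    split <;> simp
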